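-- pv_equiv track=rewrite | github.com/c788630/Numclass | classifiers/polygonal_figurate.py | _lehmer_factors
-- ===== SOURCE A (Python) =====
-- from math import log2, isqrt
-- from typing import List, Tuple
--
-- def _lehmer_factors(n: int) -> List[Tuple[int, int]]:
--     """
--     Helper function to find (a, k) pairs for which n = (a^k-1)//(a-1),
--     for bases 2..10.
--     """
--     if n < 3:
--         return []
--     results = []
--     max_k = int(log2(n + 1)) + 2
--     for k in range(2, max_k):
--         for a in range(2, 11):  # Only bases 2 to 10 inclusive
--             if (a ** k - 1) == n * (a - 1):
--                 results.append((a, k))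
--     return results
-- ===== SOURCE B (Python) =====
-- def _lehmer_factors(n: int):
--     """
--     Find (a, k) pairs with n = (a^k-1)//(a-1) for bases 2..10, by decomposing
--     n into base-a digits and checking they are all 1.
--     """
--     if n < 3:
--         return []
--     results = []
--     for a in range(2, 11):
--         m = n
--         count = 0
--         while m > 0 and m % a == 1:
--             m //= a
--             count += 1
--         if m == 0 and count >= 2:
--             results.append((a, count))
--     return sorted(results, key=lambda t: (t[1], t[0]))
-- ===== Notes on version B (the rewrite author's own statement) =====
-- stated objective: alternative
-- what changed: B replaces A's exhaustive grid scan over all exponents k up to int(log2(n+1))+2 (testing the closed form a^k-1 == n*(a-1) for every (k,a) pair) by a per-base digit decomposition: for each base a it repeatedly divides n by a checking every digit is 1, then sorts the per-base hits by (k,a) to reproduce A's order.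
import Mathlib
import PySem

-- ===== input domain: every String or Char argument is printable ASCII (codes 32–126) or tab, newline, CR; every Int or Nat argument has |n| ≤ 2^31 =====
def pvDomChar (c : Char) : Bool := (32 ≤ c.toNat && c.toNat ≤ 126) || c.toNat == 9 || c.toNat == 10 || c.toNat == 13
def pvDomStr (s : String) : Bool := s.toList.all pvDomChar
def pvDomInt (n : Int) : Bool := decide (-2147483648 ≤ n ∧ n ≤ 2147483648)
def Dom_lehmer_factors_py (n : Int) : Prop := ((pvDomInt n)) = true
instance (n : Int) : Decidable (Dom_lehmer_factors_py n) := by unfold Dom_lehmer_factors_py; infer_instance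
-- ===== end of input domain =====

-- B replaces A's (k, a) grid scan with the closed-form test by a per-base repunit
-- digit decomposition followed by a sort on (k, a); same return value, no speed claim.

-- ===== PORT A =====
-- int(log2(n + 1)) is ported as Nat.log 2 (n + 1).toNat: exact on the admitted
-- inputs (3 ≤ n after the guard, n ≤ 2^31 by Dom), where float log2 is floor-exact.
-- a ** k is ported as a ^ k.toNat: exact since k ranges over k ≥ 2.
def lehmer_factors_py (n : Int) : List (Int × Int) :=
  if n < 3 then []
  else
    let max_k : Int := (Nat.log 2 (n + 1).toNat : Int) + 2
    (PySem.List.pyRange 2 max_k 1).foldl (fun results k =>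
      (PySem.List.pyRange 2 11 1).foldl (fun results a =>
        if a ^ k.toNat - 1 == n * (a - 1) then results ++ [(a, k)] else results)
        results)
      []

-- ===== PORT B =====
-- the while loop 'while m > 0 and m % a == 1: m //= a; count += 1' of Source B;
-- the '1 < a' conjunct is a termination guard only (every call passes a ∈ range(2, 11),
-- and Python's loop condition is evaluated with that same a).
def pvDigitsLoop (a m count : Int) : Int × Int :=
  if h : 1 < a ∧ 0 < m ∧ PySem.Int.mod m a == 1 then
    pvDigitsLoop a (PySem.Int.floordiv m a) (count + 1)
  else (m, count)
termination_by m.toNat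
decreasing_by
  rw [PySem.Int.floordiv_eq_ediv_of_pos (by omega : (0:Int) < a)]
  have : (0:Int) ≤ m / a := Int.ediv_nonneg (by omega) (by omega)
  have h2 : m / a < m := by
    rw [Int.ediv_lt_iff_lt_mul (by omega : (0:Int) < a)]
    nlinarith [h.2.1]
  omega

def lehmer_factors_py_alt (n : Int) : List (Int × Int) :=
  if n < 3 then []
  else
    let results := (PySem.List.pyRange 2 11 1).foldl (fun results a =>
      let mc := pvDigitsLoop a n 0
      if mc.1 == 0 && decide (2 ≤ mc.2) then results ++ [(a, mc.2)] else results) []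
    PySem.List.sorted2 results (fun t => t.2) (fun t => t.1)

-- ===== PRECONDITION & SPEC =====
def Spec_lehmer_factors_py (n : Int) (out : List (Int × Int)) : Prop := out = lehmer_factors_py_alt n
instance (n : Int) (out : List (Int × Int)) : Decidable (Spec_lehmer_factors_py n out) := by unfold Spec_lehmer_factors_py; infer_instance

-- ===== CLAIM (what is proved, stated in full; the proofs are below) =====
def Claim_equal_lehmer_factors_py : Prop := ∀ (n : Int), Dom_lehmer_factors_py n → Spec_lehmer_factors_py n (lehmer_factors_py n)

-- ===== LEMMAS AND PROOFS =====

-- the base-a repunit with k digits: pvRep a k = 1 + a + a^2 + … + a^(k-1)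
def pvRep (a : Int) : Nat → Int
  | 0 => 0
  | k + 1 => 1 + a * pvRep a k

theorem pvRep_nonneg {a : Int} (ha : 0 ≤ a) (k : Nat) : 0 ≤ pvRep a k := by
  induction k with
  | zero => simp [pvRep]
  | succ k ih => simp only [pvRep]; positivity

theorem pvRep_mul (a : Int) (k : Nat) : pvRep a k * (a - 1) = a ^ k - 1 := by
  induction k with
  | zero => simp [pvRep]
  | succ k ih =>
    have : (1 + a * pvRep a k) * (a - 1) = a * (pvRep a k * (a - 1)) + (a - 1) := by ring
    simp only [pvRep, this, ih, pow_succ]; ring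

theorem pvCond_iff {a : Int} (ha : 2 ≤ a) (k : Nat) (n : Int) :
    a ^ k - 1 = n * (a - 1) ↔ n = pvRep a k := by
  constructor
  · intro h
    have hm := pvRep_mul a k
    have hne : a - 1 ≠ 0 := by omega
    exact mul_right_cancel₀ hne (by rw [hm, ← h])
  · intro h; rw [h, pvRep_mul]

theorem pvRep_ge {a : Int} (ha : 2 ≤ a) (k : Nat) : 2 ^ k - 1 ≤ pvRep a k := by
  induction k with
  | zero => simp [pvRep]
  | succ k ih =>
    have h := pvRep_nonneg (by omega : (0:Int) ≤ a) k
    have hp : (0:Int) < 2 ^ k := by positivity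
    simp only [pvRep, pow_succ]
    nlinarith

theorem pvLoop_fwd {a : Int} (ha : 2 ≤ a) (k : Nat) :
    ∀ c, pvDigitsLoop a (pvRep a k) c = (0, c + (k : Int)) := by
  induction k with
  | zero =>
    intro c
    rw [pvDigitsLoop]
    rw [dif_neg (by simp [pvRep])]
    simp [pvRep]
  | succ k ih =>
    intro c
    have hr := pvRep_nonneg (by omega : (0:Int) ≤ a) k
    have hpos : 0 < pvRep a (k + 1) := by simp only [pvRep]; nlinarith
    have hmod : PySem.Int.mod (pvRep a (k + 1)) a = 1 := by
      rw [PySem.Int.mod_eq_emod_of_pos (by omega : (0:Int) < a)]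
      simp only [pvRep]
      rw [Int.add_mul_emod_self_left]
      exact Int.emod_eq_of_lt (by omega) (by omega)
    have hdiv : PySem.Int.floordiv (pvRep a (k + 1)) a = pvRep a k := by
      rw [PySem.Int.floordiv_eq_ediv_of_pos (by omega : (0:Int) < a)]
      simp only [pvRep]
      rw [mul_comm, Int.add_mul_ediv_right _ _ (by omega : a ≠ 0)]
      rw [Int.ediv_eq_zero_of_lt (by omega) (by omega)]
      omega
    rw [pvDigitsLoop]
    rw [dif_pos ⟨by omega, hpos, by simp [hmod]⟩]
    rw [hdiv, ih (c + 1)]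
    simp only [Prod.mk.injEq, true_and]
    push_cast; ring

theorem pvLoop_bwd (a m c : Int) : ∀ e : Int, pvDigitsLoop a m c = (0, e) →
    c ≤ e ∧ m = pvRep a (e - c).toNat := by
  fun_induction pvDigitsLoop a m c with
  | case1 m c h ih =>
    intro e he
    obtain ⟨h1, h2⟩ := ih e he
    have hmod : PySem.Int.mod m a = 1 := by
      have := h.2.2; simpa using this
    have hsplit := PySem.Int.floordiv_mul_add_mod m a
    have ht : (e - c).toNat = (e - (c + 1)).toNat + 1 := by omega
    refine ⟨by omega, ?_⟩
    rw [ht]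
    simp only [pvRep]
    rw [← h2, mul_comm]
    omega
  | case2 m c h =>
    intro e he
    obtain ⟨rfl, rfl⟩ : m = 0 ∧ c = e := by
      constructor <;> [exact congrArg Prod.fst he; exact congrArg Prod.snd he]
    simp [pvRep]

def pvMaxk (n : Int) : Int := (Nat.log 2 (n + 1).toNat : Int) + 2

def pvAList (n : Int) : List (Int × Int) :=
  (PySem.List.pyRange 2 (pvMaxk n) 1).flatMap (fun k =>
    ((PySem.List.pyRange 2 11 1).filter (fun a => a ^ k.toNat - 1 == n * (a - 1))).map
      (fun a => (a, k)))

def pvBList (n : Int) : List (Int × Int) :=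
  ((PySem.List.pyRange 2 11 1).filter (fun a =>
      (pvDigitsLoop a n 0).1 == 0 && decide (2 ≤ (pvDigitsLoop a n 0).2))).map
    (fun a => (a, (pvDigitsLoop a n 0).2))

theorem lehmer_factors_py_eq {n : Int} (h : ¬ n < 3) :
    lehmer_factors_py n = pvAList n := by
  simp only [lehmer_factors_py, if_neg h, PySem.List.foldl_append_if,
    PySem.List.foldl_append_eq_flatMap, List.nil_append, pvAList, pvMaxk]

theorem lehmer_factors_py_alt_eq {n : Int} (h : ¬ n < 3) :
    lehmer_factors_py_alt n =
      PySem.List.sorted2 (pvBList n) (fun t => t.2) (fun t => t.1) := by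
  simp only [lehmer_factors_py_alt, if_neg h, PySem.List.foldl_append_if,
    List.nil_append, pvBList]

theorem mem_pvBList {n : Int} (x y : Int) :
    (x, y) ∈ pvBList n ↔ 2 ≤ x ∧ x < 11 ∧ 2 ≤ y ∧ n = pvRep x y.toNat := by
  simp only [pvBList, List.mem_map, List.mem_filter, PySem.List.mem_pyRange_one,
    Bool.and_eq_true, beq_iff_eq, decide_eq_true_eq, Prod.mk.injEq]
  constructor
  · rintro ⟨a, ⟨⟨ha2, ha11⟩, h1, h2⟩, rfl, rfl⟩
    have hloop : pvDigitsLoop a n 0 = (0, (pvDigitsLoop a n 0).2) := by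
      rw [Prod.ext_iff]; exact ⟨h1, rfl⟩
    obtain ⟨-, hrep⟩ := pvLoop_bwd a n 0 _ hloop
    exact ⟨ha2, ha11, h2, by simpa using hrep⟩
  · rintro ⟨hx2, hx11, hy2, hrep⟩
    have hfwd := pvLoop_fwd hx2 y.toNat 0
    have hy : ((y.toNat : Int)) = y := Int.toNat_of_nonneg (by omega)
    rw [← hrep, zero_add, hy] at hfwd
    exact ⟨x, ⟨⟨hx2, hx11⟩, by rw [hfwd], by rw [hfwd]; exact hy2⟩, rfl, by rw [hfwd]⟩

theorem pvBound {n x y : Int} (h3 : 3 ≤ n) (hx2 : 2 ≤ x) (hy2 : 2 ≤ y)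
    (hrep : n = pvRep x y.toNat) : y < pvMaxk n := by
  have hge := pvRep_ge hx2 y.toNat
  have hpow : (2 : Int) ^ y.toNat ≤ n + 1 := by omega
  have hnat : 2 ^ y.toNat ≤ (n + 1).toNat := by
    have : ((2 ^ y.toNat : Nat) : Int) = (2 : Int) ^ y.toNat := by push_cast; ring
    omega
  have hlog : y.toNat ≤ Nat.log 2 (n + 1).toNat :=
    (Nat.le_log_iff_pow_le (by norm_num) (by omega)).2 hnat
  have : ((y.toNat : Int)) = y := Int.toNat_of_nonneg (by omega)
  simp only [pvMaxk]; omega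

theorem mem_pvAList {n : Int} (h3 : 3 ≤ n) (x y : Int) :
    (x, y) ∈ pvAList n ↔ 2 ≤ x ∧ x < 11 ∧ 2 ≤ y ∧ n = pvRep x y.toNat := by
  simp only [pvAList, List.mem_flatMap, List.mem_map, List.mem_filter,
    PySem.List.mem_pyRange_one, beq_iff_eq, Prod.mk.injEq]
  constructor
  · rintro ⟨k, ⟨hk2, hkm⟩, a, ⟨⟨ha2, ha11⟩, hcond⟩, rfl, rfl⟩
    exact ⟨ha2, ha11, hk2, (pvCond_iff ha2 _ n).1 hcond⟩
  · rintro ⟨hx2, hx11, hy2, hrep⟩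
    exact ⟨y, ⟨hy2, pvBound h3 hx2 hy2 hrep⟩, x,
      ⟨⟨hx2, hx11⟩, (pvCond_iff hx2 _ n).2 hrep⟩, rfl, rfl⟩

theorem pairwise_pvAList (n : Int) :
    (pvAList n).Pairwise (fun p q =>
      toLex (p.2, p.1) < toLex (q.2, q.1)) := by
  rw [pvAList, List.pairwise_flatMap]
  constructor
  · intro k hk
    rw [List.pairwise_map]
    exact ((PySem.List.pairwise_lt_pyRange_one 2 11).filter _).imp
      (fun hab => by rw [Prod.Lex.lt_iff]; right; exact ⟨rfl, hab⟩)
  · refine (PySem.List.pairwise_lt_pyRange_one 2 (pvMaxk n)).imp ?_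
    intro k1 k2 hk p hp q hq
    obtain ⟨a, -, rfl⟩ := List.mem_map.1 hp
    obtain ⟨b, -, rfl⟩ := List.mem_map.1 hq
    rw [Prod.Lex.lt_iff]; left; exact hk

theorem nodup_pvAList (n : Int) : (pvAList n).Nodup :=
  (pairwise_pvAList n).imp (fun h he => absurd (he ▸ h) (lt_irrefl _))

theorem nodup_pvBList (n : Int) : (pvBList n).Nodup := by
  refine List.Nodup.map_on ?_ ((PySem.List.nodup_pyRange_one 2 11).filter _)
  intro x _ y _ hxy
  exact congrArg Prod.fst hxy

theorem perm_pvAList_pvBList {n : Int} (h3 : 3 ≤ n) :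
    (pvAList n).Perm (pvBList n) :=
  (List.perm_ext_iff_of_nodup (nodup_pvAList n) (nodup_pvBList n)).2
    (fun p => by rw [show p = (p.1, p.2) from rfl, mem_pvAList h3, mem_pvBList])

theorem sorted2_eq_sorted_toLex (xs : List (Int × Int)) (k1 k2 : (Int × Int) → Int) :
    PySem.List.sorted2 xs k1 k2 = PySem.List.sorted xs (fun x => toLex (k1 x, k2 x)) := by
  rw [PySem.List.sorted_eq_foldl_insertBy]
  show List.foldl (fun acc x => PySem.List.insertBy
    (fun a b => decide (k1 a < k1 b) || !decide (k1 b < k1 a) && decide (k2 a < k2 b)) x acc) [] xs = _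
  have hfn : (fun (a b : Int × Int) =>
      decide (k1 a < k1 b) || !decide (k1 b < k1 a) && decide (k2 a < k2 b)) =
      (fun a b => decide ((toLex (k1 a, k2 a) : Lex (Int × Int)) < toLex (k1 b, k2 b))) := by
    funext a b
    rcases lt_trichotomy (k1 a) (k1 b) with h | h | h <;>
      simp [Prod.Lex.lt_iff, h, lt_asymm]
  rw [hfn]

-- ===== VERDICT (by name: the statement is the Claim_ definition above) =====
theorem lehmer_factors_py_spec : Claim_equal_lehmer_factors_py := by
  intro n _
  unfold Spec_lehmer_factors_py
  by_cases h : n < 3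
  · simp [lehmer_factors_py, lehmer_factors_py_alt, if_pos h]
  · rw [lehmer_factors_py_eq h, lehmer_factors_py_alt_eq h, sorted2_eq_sorted_toLex]
    exact (PySem.List.sorted_eq_of_perm_of_pairwise_lt _ _ _
      (perm_pvAList_pvBList (by omega)) (pairwise_pvAList n)).symm
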